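-- pv_equiv track=rewrite | github.com/rysweet/gadugi | gadugi-v0.3/src/orchestrator/code_writer_engine.py | _determine_code_type
-- ===== SOURCE A (Python) =====
-- def _determine_code_type(description: str) -> str:
--     """Determine the type of code to generate."""
--     # Check API first since it's more specific than auth
--     if any(word in description for word in ["api", "endpoint", "rest", "route"]):
--         return "api_endpoint"
--     elif (
--         any(word in description for word in ["auth", "login", "authentication"])
--         and "api" not in description
--     ):
--         return "authentication"
--     elif any(
--         word in description for word in ["model", "database", "data", "schema"]
--     ):
--         return "data_model"
--     elif any(word in description for word in ["test", "testing", "unit test"]):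
--         return "test_class"
--     elif any(word in description for word in ["class", "service", "handler"]):
--         return "service_class"
--     elif any(word in description for word in ["component", "ui", "interface"]):
--         return "component"
--     else:
--         return "general_class"
-- ===== SOURCE B (Python) =====
-- _KEYWORDS = [
--     ("api", 0), ("endpoint", 0), ("rest", 0), ("route", 0),
--     ("auth", 1), ("login", 1), ("authentication", 1),
--     ("model", 2), ("database", 2), ("data", 2), ("schema", 2),
--     ("test", 3), ("testing", 3), ("unit test", 3),
--     ("class", 4), ("service", 4), ("handler", 4),
--     ("component", 5), ("ui", 5), ("interface", 5),
-- ]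
-- _LABELS = ["api_endpoint", "authentication", "data_model",
--            "test_class", "service_class", "component"]
--
--
-- def _determine_code_type(description: str) -> str:
--     # Naive multi-pattern scan: walk the description once, at each position
--     # test which keywords start there, and keep the best (minimum) priority.
--     best = len(_LABELS)
--     tail = description
--     while tail:
--         for word, rank in _KEYWORDS:
--             if rank < best and tail.startswith(word):
--                 best = rank
--         tail = tail[1:]
--     return _LABELS[best] if best < len(_LABELS) else "general_class"
-- ===== Notes on version B (the rewrite author's own statement) =====
-- stated objective: alternative
-- what changed: B is a naive multi-pattern scanner: it walks the description left-to-right once, at each position tests which of the 20 keywords start there and keeps the minimum-priority match in an accumulator, finally mapping that rank to its label; A instead runs per-group substring-search tests in an if/elif chain with a redundant no-api guard on the auth branch.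
import Mathlib
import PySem

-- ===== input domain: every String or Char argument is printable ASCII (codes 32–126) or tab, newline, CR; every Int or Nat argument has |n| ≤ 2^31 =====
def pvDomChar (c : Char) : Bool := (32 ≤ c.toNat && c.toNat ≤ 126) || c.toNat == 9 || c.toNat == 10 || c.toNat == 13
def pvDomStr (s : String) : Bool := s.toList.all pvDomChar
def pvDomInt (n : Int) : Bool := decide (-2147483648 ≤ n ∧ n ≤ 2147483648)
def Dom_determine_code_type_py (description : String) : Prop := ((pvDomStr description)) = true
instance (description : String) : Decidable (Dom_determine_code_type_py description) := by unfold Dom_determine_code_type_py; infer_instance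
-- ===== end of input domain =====

-- B changes the algorithm: a single left-to-right scan with per-position keyword
-- prefix tests and a minimum-priority accumulator, instead of A's branch chain of
-- per-group substring searches (objective: alternative; same asymptotic cost).

-- ===== PORT A =====
def determine_code_type_py (description : String) : String :=
  if ["api", "endpoint", "rest", "route"].any (fun word => PySem.Str.isIn word description) then
    "api_endpoint"
  else if ["auth", "login", "authentication"].any (fun word => PySem.Str.isIn word description)
        && !(PySem.Str.isIn "api" description) then
    "authentication"
  else if ["model", "database", "data", "schema"].any (fun word => PySem.Str.isIn word description) then
    "data_model"
  else if ["test", "testing", "unit test"].any (fun word => PySem.Str.isIn word description) then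
    "test_class"
  else if ["class", "service", "handler"].any (fun word => PySem.Str.isIn word description) then
    "service_class"
  else if ["component", "ui", "interface"].any (fun word => PySem.Str.isIn word description) then
    "component"
  else
    "general_class"

-- ===== PORT B =====
def pvKeywords : List (List Char × Nat) :=
  [("api".toList, 0), ("endpoint".toList, 0), ("rest".toList, 0), ("route".toList, 0),
   ("auth".toList, 1), ("login".toList, 1), ("authentication".toList, 1),
   ("model".toList, 2), ("database".toList, 2), ("data".toList, 2), ("schema".toList, 2),
   ("test".toList, 3), ("testing".toList, 3), ("unit test".toList, 3),
   ("class".toList, 4), ("service".toList, 4), ("handler".toList, 4),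
   ("component".toList, 5), ("ui".toList, 5), ("interface".toList, 5)]

def pvLabels : List String :=
  ["api_endpoint", "authentication", "data_model", "test_class", "service_class", "component"]

-- the inner `for word, rank in _KEYWORDS` loop body
def pvStep (tail : List Char) (best : Nat) (p : List Char × Nat) : Nat :=
  if decide (p.2 < best) && PySem.Chars.startswith tail p.1 then p.2 else best

def pvInner (tail : List Char) (best : Nat) : Nat :=
  pvKeywords.foldl (pvStep tail) best

-- the outer `while tail:` loop (tail = tail[1:] each iteration)
def pvScan : List Char → Nat → Nat
  | [], best => best
  | c :: rest, best => pvScan rest (pvInner (c :: rest) best)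

def determine_code_type_py_alt (description : String) : String :=
  let best := pvScan description.toList 6
  if best < 6 then pvLabels.getD best "general_class" else "general_class"

-- ===== PRECONDITION & SPEC =====
def Spec_determine_code_type_py (description : String) (out : String) : Prop := out = determine_code_type_py_alt description
instance (description : String) (out : String) : Decidable (Spec_determine_code_type_py description out) := by unfold Spec_determine_code_type_py; infer_instance

-- ===== CLAIM (what is proved, stated in full; the proofs are below) =====
def Claim_equal_determine_code_type_py : Prop := ∀ (description : String), Dom_determine_code_type_py description → Spec_determine_code_type_py description (determine_code_type_py description)

-- ===== LEMMAS AND PROOFS =====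

-- A's keyword groups, by rank
def pvGroup : Nat → List String
  | 0 => ["api", "endpoint", "rest", "route"]
  | 1 => ["auth", "login", "authentication"]
  | 2 => ["model", "database", "data", "schema"]
  | 3 => ["test", "testing", "unit test"]
  | 4 => ["class", "service", "handler"]
  | 5 => ["component", "ui", "interface"]
  | _ => []

def pvAnyG (r : Nat) (d : String) : Bool :=
  (pvGroup r).any (fun w => PySem.Str.isIn w d)

theorem pvFold_le (kws : List (List Char × Nat)) (t : List Char) (b : Nat) :
    kws.foldl (pvStep t) b ≤ b := by
  induction kws generalizing b with
  | nil => simp [List.foldl]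
  | cons p rest ih =>
    simp only [List.foldl_cons]
    refine le_trans (ih _) ?_
    unfold pvStep
    split
    · rename_i h; simp only [Bool.and_eq_true, decide_eq_true_eq] at h; omega
    · exact le_rfl

theorem pvFold_matched_le (kws : List (List Char × Nat)) (t : List Char) (b : Nat)
    (p : List Char × Nat) (hp : p ∈ kws) (hm : PySem.Chars.startswith t p.1 = true) :
    kws.foldl (pvStep t) b ≤ p.2 := by
  induction kws generalizing b with
  | nil => cases hp
  | cons q rest ih =>
    simp only [List.foldl_cons]
    rcases List.mem_cons.mp hp with rfl | hp'
    · refine le_trans (pvFold_le rest t _) ?_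
      unfold pvStep; rw [hm]
      by_cases hb : p.2 < b
      · simp [hb]
      · simp only [Bool.and_true]
        rw [if_neg (by simpa using hb)]
        omega
    · exact ih _ hp'

theorem pvFold_cases (kws : List (List Char × Nat)) (t : List Char) (b : Nat) :
    kws.foldl (pvStep t) b = b ∨
      ∃ p ∈ kws, PySem.Chars.startswith t p.1 = true ∧ kws.foldl (pvStep t) b = p.2 := by
  induction kws generalizing b with
  | nil => exact Or.inl rfl
  | cons q rest ih =>
    have hrec : List.foldl (pvStep t) b (q :: rest) = List.foldl (pvStep t) (pvStep t b q) rest := rfl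
    rcases ih (pvStep t b q) with h | ⟨p, hp, hm, he⟩
    · by_cases hc : (decide (q.2 < b) && PySem.Chars.startswith t q.1) = true
      · have hq : pvStep t b q = q.2 := by unfold pvStep; exact if_pos hc
        refine Or.inr ⟨q, by simp, ?_, ?_⟩
        · simp only [Bool.and_eq_true] at hc; exact hc.2
        · rw [hrec, h, hq]
      · have hq : pvStep t b q = b := by unfold pvStep; exact if_neg hc
        exact Or.inl (by rw [hrec, h, hq])
    · exact Or.inr ⟨p, by simp [hp], hm, by rw [hrec, he]⟩

theorem pvScan_le (t : List Char) (b : Nat) : pvScan t b ≤ b := by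
  induction t generalizing b with
  | nil => simp [pvScan]
  | cons c rest ih => exact le_trans (ih _) (pvFold_le _ _ _)

theorem pvScan_matched_le (t : List Char) (b : Nat) (p : List Char × Nat)
    (hp : p ∈ pvKeywords) (hi : p.1 <:+: t) : pvScan t b ≤ p.2 := by
  induction t generalizing b with
  | nil =>
    have hnil : p.1 = [] := by simpa using hi
    fin_cases hp <;> simp_all
  | cons c rest ih =>
    rcases List.infix_cons_iff.mp hi with hpre | hinf
    · refine le_trans (pvScan_le rest _) ?_
      exact pvFold_matched_le _ _ _ p hp ((PySem.Chars.startswith_iff _ _).mpr hpre)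
    · exact ih _ hinf

theorem pvScan_cases (t : List Char) (b : Nat) :
    pvScan t b = b ∨ ∃ p ∈ pvKeywords, p.1 <:+: t ∧ pvScan t b = p.2 := by
  induction t generalizing b with
  | nil => exact Or.inl rfl
  | cons c rest ih =>
    rcases ih (pvInner (c :: rest) b) with h | ⟨p, hp, hi, he⟩
    · rw [show pvScan (c :: rest) b = pvScan rest (pvInner (c :: rest) b) from rfl, h]
      rcases pvFold_cases pvKeywords (c :: rest) b with h2 | ⟨p, hp, hm, he⟩
      · exact Or.inl h2
      · exact Or.inr ⟨p, hp, List.infix_cons_iff.mpr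
          (Or.inl ((PySem.Chars.startswith_iff _ _).mp hm)), he⟩
    · exact Or.inr ⟨p, hp, List.infix_cons_iff.mpr (Or.inr hi), he⟩

-- a keyword that occurs in d activates its group's flag in A
theorem pvMatched_imp (d : String) (p : List Char × Nat) (hp : p ∈ pvKeywords)
    (hi : p.1 <:+: d.toList) : pvAnyG p.2 d = true := by
  fin_cases hp <;>
  · have h2 := (PySem.Chars.isIn_iff_infix _ _).mpr hi
    simp_all [pvAnyG, pvGroup, List.any]

-- a group flag yields a matching keyword of that rank
theorem pvAnyG_exists (d : String) (r : Nat) (h : pvAnyG r d = true) :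
    ∃ p ∈ pvKeywords, p.2 = r ∧ p.1 <:+: d.toList := by
  unfold pvAnyG at h
  obtain ⟨w, hw, hwin⟩ := List.any_eq_true.mp h
  have hinf := (PySem.Str.isIn_iff_infix _ _).mp hwin
  refine ⟨(w.toList, r), ?_, rfl, hinf⟩
  obtain _|_|_|_|_|_|n := r <;>
    simp only [pvGroup, List.mem_cons, List.not_mem_nil, or_false] at hw <;>
    rcases hw with rfl|rfl|rfl|rfl <;> decide

-- if every group flag below r is off, the scan result is at least r
theorem pvScan_ge (d : String) (r : Nat) (hr : r ≤ 6)
    (hfalse : ∀ j < r, pvAnyG j d = false) : r ≤ pvScan d.toList 6 := by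
  rcases pvScan_cases d.toList 6 with h | ⟨p, hp, hi, he⟩
  · omega
  · have hflag := pvMatched_imp d p hp hi
    rw [he]
    by_contra hlt
    exact absurd hflag (by simp [hfalse p.2 (by omega)])

-- if group r's flag is on, the scan result is at most r
theorem pvScan_le_of_flag (d : String) (r : Nat) (h : pvAnyG r d = true) :
    pvScan d.toList 6 ≤ r := by
  obtain ⟨p, hp, hr, hi⟩ := pvAnyG_exists d r h
  exact hr ▸ pvScan_matched_le d.toList 6 p hp hi

theorem pvScan_eq (d : String) (r : Nat) (hr : r ≤ 6)
    (hlow : ∀ j < r, pvAnyG j d = false)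
    (hhit : r < 6 → pvAnyG r d = true) : pvScan d.toList 6 = r := by
  have h1 := pvScan_ge d r hr hlow
  rcases Nat.lt_or_ge r 6 with h6 | h6
  · exact le_antisymm (pvScan_le_of_flag d r (hhit h6)) h1
  · have := pvScan_le d.toList 6
    omega

-- ===== VERDICT (by name: the statement is the Claim_ definition above) =====
theorem determine_code_type_py_spec : Claim_equal_determine_code_type_py := by
  intro d _
  unfold Spec_determine_code_type_py determine_code_type_py determine_code_type_py_alt
  have e0 : pvAnyG 0 d = (["api", "endpoint", "rest", "route"].any fun w => PySem.Str.isIn w d) := rfl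
  have e1 : pvAnyG 1 d = (["auth", "login", "authentication"].any fun w => PySem.Str.isIn w d) := rfl
  have e2 : pvAnyG 2 d = (["model", "database", "data", "schema"].any fun w => PySem.Str.isIn w d) := rfl
  have e3 : pvAnyG 3 d = (["test", "testing", "unit test"].any fun w => PySem.Str.isIn w d) := rfl
  have e4 : pvAnyG 4 d = (["class", "service", "handler"].any fun w => PySem.Str.isIn w d) := rfl
  have e5 : pvAnyG 5 d = (["component", "ui", "interface"].any fun w => PySem.Str.isIn w d) := rfl
  by_cases h0 : pvAnyG 0 d = true
  · rw [pvScan_eq d 0 (by omega) (by omega) (fun _ => h0), if_pos (e0 ▸ h0)]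
    simp [pvLabels]
  · have h0f : pvAnyG 0 d = false := by simpa using h0
    have hapi : PySem.Str.isIn "api" d = false := by
      cases hq : PySem.Str.isIn "api" d with
      | false => rfl
      | true =>
        exact absurd (show pvAnyG 0 d = true from List.any_eq_true.mpr ⟨"api", by simp [pvGroup], hq⟩) h0
    rw [if_neg (e0 ▸ h0)]
    by_cases h1 : pvAnyG 1 d = true
    · rw [pvScan_eq d 1 (by omega) (by intro j hj; interval_cases j; exact h0f) (fun _ => h1)]
      rw [if_pos (show ((["auth", "login", "authentication"].any fun w => PySem.Str.isIn w d)
            && !(PySem.Str.isIn "api" d)) = true from by rw [← e1, h1, hapi]; rfl)]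
      simp [pvLabels]
    · have h1f : pvAnyG 1 d = false := by simpa using h1
      rw [if_neg (show ¬(((["auth", "login", "authentication"].any fun w => PySem.Str.isIn w d)
            && !(PySem.Str.isIn "api" d)) = true) from by rw [← e1, h1f]; simp)]
      by_cases h2 : pvAnyG 2 d = true
      · rw [pvScan_eq d 2 (by omega) (by intro j hj; interval_cases j <;> assumption) (fun _ => h2),
          if_pos (e2 ▸ h2)]
        simp [pvLabels]
      · have h2f : pvAnyG 2 d = false := by simpa using h2
        rw [if_neg (by rw [← e2]; simp [h2f])]
        by_cases h3 : pvAnyG 3 d = true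
        · rw [pvScan_eq d 3 (by omega) (by intro j hj; interval_cases j <;> assumption) (fun _ => h3),
            if_pos (e3 ▸ h3)]
          simp [pvLabels]
        · have h3f : pvAnyG 3 d = false := by simpa using h3
          rw [if_neg (by rw [← e3]; simp [h3f])]
          by_cases h4 : pvAnyG 4 d = true
          · rw [pvScan_eq d 4 (by omega) (by intro j hj; interval_cases j <;> assumption) (fun _ => h4),
              if_pos (e4 ▸ h4)]
            simp [pvLabels]
          · have h4f : pvAnyG 4 d = false := by simpa using h4
            rw [if_neg (by rw [← e4]; simp [h4f])]
            by_cases h5 : pvAnyG 5 d = true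
            · rw [pvScan_eq d 5 (by omega) (by intro j hj; interval_cases j <;> assumption) (fun _ => h5),
                if_pos (e5 ▸ h5)]
              simp [pvLabels]
            · have h5f : pvAnyG 5 d = false := by simpa using h5
              rw [if_neg (by rw [← e5]; simp [h5f])]
              rw [pvScan_eq d 6 (by omega) (by intro j hj; interval_cases j <;> assumption) (by omega)]
              simp
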